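-- pv_equiv track=rewrite | github.com/JonaCodes/skills | feature-map-init/scripts/ensure_feature_seeds.py | has_feature_entries
-- ===== SOURCE A (Python) =====
-- def has_feature_entries(text: str) -> bool:
--     lines = [line.rstrip() for line in text.splitlines()]
--     saw_features = False
--     for line in lines:
--         stripped = line.strip()
--         if not stripped or stripped.startswith("#"):
--             continue
--         if stripped == "features:":
--             saw_features = True
--             continue
--         if saw_features and stripped.startswith("- name:"):
--             return True
--     return False
-- ===== SOURCE B (Python) =====
-- def has_feature_entries(text: str) -> bool:
--     stripped = [line.strip() for line in text.splitlines()]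
--     if "features:" not in stripped:
--         return False
--     idx = stripped.index("features:")
--     return any(s.startswith("- name:") for s in stripped[idx + 1:])
-- ===== Notes on version B (the rewrite author's own statement) =====
-- stated objective: simpler
-- what changed: Replaces the single-pass saw_features flag state machine with a two-phase decomposition: strip every line once, locate the first 'features:' line, then scan only the remaining slice for '- name:' entries.
import Mathlib
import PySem

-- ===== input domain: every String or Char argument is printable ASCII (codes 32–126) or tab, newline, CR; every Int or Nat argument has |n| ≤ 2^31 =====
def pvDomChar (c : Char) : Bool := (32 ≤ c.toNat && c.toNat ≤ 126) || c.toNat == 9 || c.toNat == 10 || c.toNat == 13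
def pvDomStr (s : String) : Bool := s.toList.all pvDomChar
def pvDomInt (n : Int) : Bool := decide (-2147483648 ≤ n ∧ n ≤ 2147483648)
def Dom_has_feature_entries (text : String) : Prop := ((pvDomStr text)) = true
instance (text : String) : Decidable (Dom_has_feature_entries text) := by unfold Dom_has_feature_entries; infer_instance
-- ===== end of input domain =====

-- B replaces A's one-pass saw_features flag state machine by an anchor search (first 'features:'
-- line) followed by a scan of the remaining slice; same return value (objective: simpler decomposition).

-- ===== PORT A =====
-- the for-loop with its early 'return True' as structural recursion over the lines, carrying the flag
def hfeA : Bool → List String → Bool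
  | _, [] => false
  | saw, line :: rest =>
    let stripped := PySem.Str.strip line
    if stripped = "" || PySem.Str.startswith stripped "#" then hfeA saw rest
    else if stripped = "features:" then hfeA true rest
    else if saw && PySem.Str.startswith stripped "- name:" then true
    else hfeA saw rest

def has_feature_entries (text : String) : Bool :=
  let lines := (PySem.Str.splitlines text).map (fun line => PySem.Str.rstrip line)
  hfeA false lines

-- ===== PORT B =====
def has_feature_entries_alt (text : String) : Bool :=
  let stripped := (PySem.Str.splitlines text).map (fun line => PySem.Str.strip line)
  if stripped.contains "features:" then
    match PySem.List.index? stripped "features:" with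
    | some idx =>
        (PySem.List.slice stripped (some ((idx : Int) + 1)) none).any
          (fun s => PySem.Str.startswith s "- name:")
    | none => false
  else false

-- ===== PRECONDITION & SPEC =====
def Spec_has_feature_entries (text : String) (out : Bool) : Prop := out = has_feature_entries_alt text
instance (text : String) (out : Bool) : Decidable (Spec_has_feature_entries text out) := by unfold Spec_has_feature_entries; infer_instance

-- ===== CLAIM (what is proved, stated in full; the proofs are below) =====
def Claim_equal_has_feature_entries : Prop := ∀ (text : String), Dom_has_feature_entries text → Spec_has_feature_entries text (has_feature_entries text)

-- ===== LEMMAS AND PROOFS =====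

-- B's anchor-then-scan core, expressed with List.drop on the list of already-stripped lines
def hfeBcore (S : List String) : Bool :=
  match PySem.List.index? S "features:" with
  | some idx => (S.drop (idx + 1)).any (fun s => PySem.Str.startswith s "- name:")
  | none => false

-- stripping a right-stripped string strips the original (Chars level)
theorem chars_strip_rstrip (l : List Char) :
    PySem.Chars.strip (PySem.Chars.rstrip l) = PySem.Chars.strip l := by
  simp only [PySem.Chars.strip, PySem.Chars.rstrip, PySem.Chars.lstrip]
  set p := PySem.Chars.isspace with hp
  set R : List Char := (List.dropWhile p l.reverse).reverse with hR
  set T : List Char := (List.takeWhile p l.reverse).reverse with hT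
  have hdec : l = R ++ T := by
    rw [hR, hT, ← List.reverse_append, List.takeWhile_append_dropWhile, List.reverse_reverse]
  have hTall : ∀ x ∈ T, p x = true := by
    intro x hx
    rw [hT, List.mem_reverse] at hx
    exact List.mem_takeWhile_imp hx
  have hRR : R.reverse = List.dropWhile p l.reverse := by
    rw [hR, List.reverse_reverse]
  by_cases hRnil : R = []
  · -- the whole line is whitespace
    have hlall : List.dropWhile p l.reverse = [] := by
      rw [← hRR, hRnil, List.reverse_nil]
    have : List.dropWhile p l = [] := by
      rw [List.dropWhile_eq_nil_iff]
      intro x hx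
      exact (List.dropWhile_eq_nil_iff.mp hlall) x (List.mem_reverse.mpr hx)
    rw [hRnil, this]
    simp
  · -- the last char of R is not whitespace, so dropWhile p R ≠ []
    have hdw : List.dropWhile p R ≠ [] := by
      intro hcon
      have hall := List.dropWhile_eq_nil_iff.mp hcon
      have hne : List.dropWhile p l.reverse ≠ [] := by
        intro h0; apply hRnil; rw [← hRR] at h0; simpa using congrArg List.reverse h0
      have hhead := List.head_dropWhile_not p hne
      have hmem : (List.dropWhile p l.reverse).head hne ∈ R := by
        rw [hR, List.mem_reverse]; exact List.head_mem hne
      rw [hall _ hmem] at hhead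
      simp at hhead
    have hTrev : List.dropWhile p T.reverse = [] := by
      rw [List.dropWhile_eq_nil_iff]
      intro x hx; exact hTall x (List.mem_reverse.mp hx)
    have hsplit : List.dropWhile p l = List.dropWhile p R ++ T := by
      rw [hdec, List.dropWhile_append]
      simp [List.isEmpty_iff, hdw]
    rw [hsplit, List.reverse_append, List.dropWhile_append, hTrev]
    simp

theorem strip_rstrip (s : String) : PySem.Str.strip (PySem.Str.rstrip s) = PySem.Str.strip s := by
  simp only [PySem.Str.strip, PySem.Str.toList_rstrip, chars_strip_rstrip]

-- a stripped line that starts with '#' neither starts with "- name:" nor equals "features:"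
theorem hash_not_name (s : String) (h : PySem.Str.startswith s "#" = true) :
    PySem.Str.startswith s "- name:" = false := by
  rw [PySem.Str.startswith_eq] at *
  rw [PySem.Chars.startswith_iff] at h
  cases hs : s.toList with
  | nil => simp [hs] at h
  | cons c t =>
    rw [hs] at h
    have hh : '#' = c := by
      have : "#".toList = ['#'] := by decide
      rw [this] at h
      exact (List.cons_prefix_cons.mp h).1
    apply Bool.eq_false_iff.mpr
    intro hc
    rw [PySem.Chars.startswith_iff] at hc
    have : "- name:".toList = '-' :: " name:".toList := by decide
    rw [this] at hc
    have hd : '-' = c := (List.cons_prefix_cons.mp hc).1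
    rw [← hh] at hd
    exact absurd hd (by decide)

-- once the flag is set, A just looks for a "- name:" line: the skipped kinds can never match
theorem hfeA_true (L : List String) :
    hfeA true L = (L.map (fun line => PySem.Str.strip line)).any
      (fun s => PySem.Str.startswith s "- name:") := by
  induction L with
  | nil => simp [hfeA]
  | cons line rest ih =>
    rw [hfeA, List.map_cons, List.any_cons]
    by_cases hskip : (PySem.Str.strip line = "" || PySem.Str.startswith (PySem.Str.strip line) "#") = true
    · have hname : PySem.Str.startswith (PySem.Str.strip line) "- name:" = false := by
        rcases Bool.or_eq_true_iff.mp hskip with h | h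
        · rw [decide_eq_true_eq] at h; rw [h]; decide
        · exact hash_not_name _ h
      rw [if_pos hskip, ih, hname, Bool.false_or]
    · rw [if_neg hskip]
      by_cases h2 : PySem.Str.strip line = "features:"
      · have hname : PySem.Str.startswith (PySem.Str.strip line) "- name:" = false := by
          rw [h2]; decide
        rw [if_pos h2, ih, hname, Bool.false_or]
      · rw [if_neg h2, Bool.true_and]
        cases h3 : PySem.Str.startswith (PySem.Str.strip line) "- name:" with
        | true => simp
        | false =>
          rw [Bool.false_or]
          simp only [Bool.false_eq_true, if_false]
          exact ih

-- before the flag is set, A computes exactly B's anchor-then-scan core over the stripped lines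
theorem hfeA_false (L : List String) :
    hfeA false L = hfeBcore (L.map (fun line => PySem.Str.strip line)) := by
  induction L with
  | nil => simp [hfeA, hfeBcore, PySem.List.index?]
  | cons line rest ih =>
    rw [hfeA, List.map_cons]
    by_cases h2 : PySem.Str.strip line = "features:"
    · have hskip : (PySem.Str.strip line = "" || PySem.Str.startswith (PySem.Str.strip line) "#") = false := by
        rw [h2]; decide
      rw [hskip]
      simp only [Bool.false_eq_true, if_false, h2]
      rw [hfeA_true, hfeBcore, PySem.List.index?_cons_self]
      simp
    · have hne : "features:" ≠ PySem.Str.strip line := fun h => h2 h.symm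
      have hBstep : hfeBcore (PySem.Str.strip line :: List.map (fun line => PySem.Str.strip line) rest)
          = hfeBcore (List.map (fun line => PySem.Str.strip line) rest) := by
        rw [hfeBcore, hfeBcore, PySem.List.index?_cons_of_ne _ (fun h => h2 h)]
        cases PySem.List.index? (List.map (fun line => PySem.Str.strip line) rest) "features:" with
        | none => simp
        | some i => simp [List.drop_succ_cons]
      rw [hBstep]
      by_cases h1 : (PySem.Str.strip line = "" || PySem.Str.startswith (PySem.Str.strip line) "#") = true
      · rw [if_pos h1, ih]
      · simp only [h1, Bool.false_eq_true, if_false] at *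
        rw [if_neg h2]
        simp only [Bool.false_and, Bool.false_eq_true, if_false]
        exact ih

-- A strips each line twice (rstrip, then strip); a single strip gives the same stripped line
theorem hfeA_map_rstrip (saw : Bool) (L : List String) :
    hfeA saw (L.map (fun line => PySem.Str.rstrip line)) = hfeA saw L := by
  induction L generalizing saw with
  | nil => simp
  | cons line rest ih =>
    rw [List.map_cons, hfeA, hfeA, strip_rstrip]
    cases saw <;> split_ifs <;> simp [ih]

-- B's slice/contains/index? form computes the drop-based core
theorem alt_eq_core (S : List String) :
    (if S.contains "features:" then
      match PySem.List.index? S "features:" with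
      | some idx =>
          (PySem.List.slice S (some ((idx : Int) + 1)) none).any
            (fun s => PySem.Str.startswith s "- name:")
      | none => false
    else false) = hfeBcore S := by
  cases hidx : PySem.List.index? S "features:" with
  | some idx =>
    have hmem : "features:" ∈ S := by
      rw [← PySem.List.index?_isSome_iff, hidx]; rfl
    have hcont : S.contains "features:" = true := by simpa using hmem
    rw [if_pos hcont, hfeBcore, hidx]
    show (PySem.List.slice S (some ((idx : Int) + 1)) none).any _
        = (S.drop (idx + 1)).any _
    have hc : ((idx : Int) + 1) = ((idx + 1 : Nat) : Int) := by push_cast; ring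
    rw [hc, PySem.List.slice_from_natCast]
  | none =>
    have hmem : "features:" ∉ S := (PySem.List.index?_eq_none_iff S "features:").mp hidx
    have hcont : S.contains "features:" = false := by simpa using hmem
    rw [hfeBcore, hidx]
    simp only [hcont, Bool.false_eq_true, if_false]

-- ===== VERDICT (by name: the statement is the Claim_ definition above) =====
theorem has_feature_entries_spec : Claim_equal_has_feature_entries := by
  intro text _
  unfold Spec_has_feature_entries has_feature_entries has_feature_entries_alt
  rw [hfeA_map_rstrip, hfeA_false]
  exact (alt_eq_core ((PySem.Str.splitlines text).map (fun line => PySem.Str.strip line))).symm
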